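-- pv_equiv track=rewrite | github.com/Jlima2016306/IPC2_Proyecto1_-202200002 | Listas/Lista_dato.py | narC
-- ===== SOURCE A (Python) =====
-- def narC(string_resultado,contador,caracter):
--                 cont4=0
--                 contador2=0
--
--                 for caracter2 in string_resultado:
--                    contador2+=1
--                    if caracter2.isdigit():
--                         cont4+=1
--                         if caracter2==caracter:
--                           return cont4
-- ===== SOURCE B (Python) =====
-- def narC(string_resultado, contador, caracter):
--     digits = [c for c in string_resultado if c.isdigit()]
--     if caracter in digits:
--         return digits.index(caracter) + 1
--     return None
-- ===== Notes on version B (the rewrite author's own statement) =====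
-- stated objective: alternative
-- what changed: B filters the string's digit characters into a list once and returns the 1-based position of the target character in that list, instead of A's single loop that interleaves a digit counter with the equality search and returns from inside the loop.
import Mathlib
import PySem

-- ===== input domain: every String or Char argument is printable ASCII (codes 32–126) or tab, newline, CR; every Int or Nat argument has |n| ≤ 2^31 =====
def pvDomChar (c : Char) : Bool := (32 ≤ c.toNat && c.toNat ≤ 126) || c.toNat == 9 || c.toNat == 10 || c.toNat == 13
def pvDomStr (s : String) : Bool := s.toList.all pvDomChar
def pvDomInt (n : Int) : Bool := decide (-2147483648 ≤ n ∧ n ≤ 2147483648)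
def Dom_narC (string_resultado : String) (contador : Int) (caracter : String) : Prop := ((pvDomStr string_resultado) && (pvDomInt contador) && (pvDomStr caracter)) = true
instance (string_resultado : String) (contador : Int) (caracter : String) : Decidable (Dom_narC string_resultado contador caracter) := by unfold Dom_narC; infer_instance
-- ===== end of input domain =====

-- B filters the string's digits into a list once and returns the 1-based position of the
-- target in that list, instead of A's single loop interleaving counters with the search.

-- ===== PORT A =====
-- the for-loop with its two counters and the early return inside it
def narCLoop (cs : List Char) (cont4 contador2 : Int) (caracter : List Char) : Option Int :=
  match cs with
  | [] => none
  | ch :: rest =>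
    let contador2' := contador2 + 1
    if PySem.Chars.isdigit ch then
      if [ch] = caracter then some (cont4 + 1)
      else narCLoop rest (cont4 + 1) contador2' caracter
    else narCLoop rest cont4 contador2' caracter

def narC (string_resultado : String) (contador : Int) (caracter : String) : Option Int :=
  narCLoop string_resultado.toList 0 0 caracter.toList

-- ===== PORT B =====
-- digits = [c for c in string_resultado if c.isdigit()]; iterating a Python string yields
-- one-character strings, so each kept character is the one-element list [c]
def narC_alt (string_resultado : String) (contador : Int) (caracter : String) : Option Int :=
  let digits : List (List Char) :=
    (string_resultado.toList.filter (fun c => PySem.Chars.isdigit c)).map (fun c => [c])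
  match PySem.List.index? digits caracter.toList with
  | some i => some ((i : Int) + 1)
  | none => none

-- ===== PRECONDITION & SPEC =====
def Spec_narC (string_resultado : String) (contador : Int) (caracter : String) (out : Option Int) : Prop := out = narC_alt string_resultado contador caracter
instance (string_resultado : String) (contador : Int) (caracter : String) (out : Option Int) : Decidable (Spec_narC string_resultado contador caracter out) := by unfold Spec_narC; infer_instance

-- ===== CLAIM (what is proved, stated in full; the proofs are below) =====
def Claim_equal_narC : Prop := ∀ (string_resultado : String) (contador : Int) (caracter : String), Dom_narC string_resultado contador caracter → Spec_narC string_resultado contador caracter (narC string_resultado contador caracter)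

-- ===== LEMMAS AND PROOFS =====

-- the loop returns c4 plus the 1-based index of the target in the filtered digit list
theorem narCLoop_eq_index (cs : List Char) (c4 c2 : Int) (car : List Char) :
    narCLoop cs c4 c2 car =
      match PySem.List.index?
          ((cs.filter (fun c => PySem.Chars.isdigit c)).map (fun c => [c])) car with
      | some i => some (c4 + (i : Int) + 1)
      | none => none := by
  induction cs generalizing c4 c2 with
  | nil => simp [narCLoop, PySem.List.index?]
  | cons ch rest ih =>
    by_cases hd : PySem.Chars.isdigit ch = true
    · rw [narCLoop]
      simp only [hd, if_true, List.filter_cons_of_pos hd, List.map_cons]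
      by_cases he : [ch] = car
      · subst he
        rw [if_pos rfl, PySem.List.index?_cons_self]
        simp
      · simp only [he, if_false, ih]
        rw [PySem.List.index?_cons_of_ne _ he]
        cases h : PySem.List.index?
            ((rest.filter (fun c => PySem.Chars.isdigit c)).map (fun c => [c])) car with
        | none => simp
        | some i =>
          simp only [Option.map_some]
          push_cast
          ring_nf
    · rw [narCLoop]
      simp only [Bool.not_eq_true] at hd
      rw [List.filter_cons_of_neg (by simp [hd])]
      simp only [hd, Bool.false_eq_true, if_false, ih]

-- ===== VERDICT (by name: the statement is the Claim_ definition above) =====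
theorem narC_spec : Claim_equal_narC := by
  intro s contador car _
  simp only [Spec_narC, narC, narC_alt]
  rw [narCLoop_eq_index]
  cases h : PySem.List.index?
      ((s.toList.filter (fun c => PySem.Chars.isdigit c)).map (fun c => [c])) car.toList with
  | none => simp
  | some i => simp
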